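-- pv_equiv track=rewrite | github.com/pzfreo/fabprint | src/fabprint/init.py | _match_filament_profile
-- ===== SOURCE A (Python) =====
-- def _match_filament_profile(tray_type: str, profile_names: list[str]) -> str | None:
--     """Best-effort match an AMS tray type (e.g. 'PLA') to a slicer profile name.
--
--     Looks for 'Generic <type>' first, then any profile containing the type string.
--     """
--     tray_upper = tray_type.upper()
--     # Prefer "Generic PLA @base" style
--     for name in profile_names:
--         if name.upper().startswith(f"GENERIC {tray_upper}") and "@base" in name.lower():
--             return name
--     for name in profile_names:
--         if name.upper().startswith(f"GENERIC {tray_upper}"):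
--             return name
--     # Fallback: any profile containing the type
--     for name in profile_names:
--         if tray_upper in name.upper():
--             return name
--     return None
-- ===== SOURCE B (Python) =====
-- def _match_filament_profile(tray_type: str, profile_names: list[str]) -> str | None:
--     """One pass: rank each name (0 = generic+@base, 1 = generic, 2 = substring),
--     return immediately on rank 0, otherwise keep the first lowest-rank candidate."""
--     tray_upper = tray_type.upper()
--     prefix = f"GENERIC {tray_upper}"
--     best = None  # (rank, name), first name with the strictly lowest rank so far
--     for name in profile_names:
--         name_upper = name.upper()
--         if name_upper.startswith(prefix):
--             if "@base" in name.lower():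
--                 return name
--             rank = 1
--         elif tray_upper in name_upper:
--             rank = 2
--         else:
--             continue
--         if best is None or rank < best[0]:
--             best = (rank, name)
--     return best[1] if best is not None else None
-- ===== Notes on version B (the rewrite author's own statement) =====
-- stated objective: faster
-- what changed: Replaced the three sequential scans (generic+@base, generic, substring) by one single pass that ranks each name and keeps the first lowest-rank candidate, early-returning only on a rank-0 hit.
import Mathlib
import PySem

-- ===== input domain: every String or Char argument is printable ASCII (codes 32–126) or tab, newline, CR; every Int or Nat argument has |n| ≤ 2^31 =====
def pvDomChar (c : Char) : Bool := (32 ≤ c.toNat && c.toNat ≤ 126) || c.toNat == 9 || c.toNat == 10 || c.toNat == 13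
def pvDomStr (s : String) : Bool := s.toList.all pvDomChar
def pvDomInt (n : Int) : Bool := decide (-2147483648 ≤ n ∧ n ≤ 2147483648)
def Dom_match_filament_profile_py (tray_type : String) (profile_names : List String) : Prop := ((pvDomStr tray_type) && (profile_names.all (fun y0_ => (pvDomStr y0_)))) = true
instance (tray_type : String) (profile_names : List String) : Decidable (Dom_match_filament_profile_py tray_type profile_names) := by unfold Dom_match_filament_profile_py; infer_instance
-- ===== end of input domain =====

-- B replaces A's three sequential scans by one ranked single pass; return value proved equal.

-- shared tests (both Pythons compute exactly these expressions)
-- name.upper().startswith(f"GENERIC {tray_upper}")   (pre = "GENERIC " ++ tray_upper)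
def pvP1 (pre : List Char) (name : String) : Bool :=
  PySem.Chars.startswith (PySem.Chars.upper name.toList) pre
-- "@base" in name.lower()
def pvBase (name : String) : Bool :=
  PySem.Chars.isIn "@base".toList (PySem.Chars.lower name.toList)
-- tray_upper in name.upper()
def pvP2 (tu : List Char) (name : String) : Bool :=
  PySem.Chars.isIn tu (PySem.Chars.upper name.toList)

-- ===== PORT A =====
-- Three for-loops with early return, each ported as List.find? over its test, in order.
def match_filament_profile_py (tray_type : String) (profile_names : List String) : Option String :=
  let tu := PySem.Chars.upper tray_type.toList
  let pre := "GENERIC ".toList ++ tu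
  match profile_names.find? (fun name => pvP1 pre name && pvBase name) with
  | some name => some name
  | none =>
    match profile_names.find? (fun name => pvP1 pre name) with
    | some name => some name
    | none => profile_names.find? (fun name => pvP2 tu name)

-- ===== PORT B =====
-- 'if best is None or rank < best[0]: best = (rank, name)'
def pvUpd (best : Option (Nat × String)) (rank : Nat) (name : String) : Option (Nat × String) :=
  match best with
  | none => some (rank, name)
  | some b => if rank < b.1 then some (rank, name) else some b

-- the single loop of Source B: rank each name, early return on rank 0, else keep best
def pvAltGo (tu pre : List Char) (names : List String) (best : Option (Nat × String)) :
    Option String :=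
  match names with
  | [] => best.map Prod.snd
  | name :: rest =>
    if pvP1 pre name then
      if pvBase name then some name
      else pvAltGo tu pre rest (pvUpd best 1 name)
    else if pvP2 tu name then
      pvAltGo tu pre rest (pvUpd best 2 name)
    else
      pvAltGo tu pre rest best

def match_filament_profile_py_alt (tray_type : String) (profile_names : List String) : Option String :=
  let tu := PySem.Chars.upper tray_type.toList
  pvAltGo tu ("GENERIC ".toList ++ tu) profile_names none

-- ===== PRECONDITION & SPEC =====
def Spec_match_filament_profile_py (tray_type : String) (profile_names : List String) (out : Option String) : Prop := out = match_filament_profile_py_alt tray_type profile_names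
instance (tray_type : String) (profile_names : List String) (out : Option String) : Decidable (Spec_match_filament_profile_py tray_type profile_names out) := by unfold Spec_match_filament_profile_py; infer_instance

-- ===== CLAIM (what is proved, stated in full; the proofs are below) =====
def Claim_equal_match_filament_profile_py : Prop := ∀ (tray_type : String) (profile_names : List String), Dom_match_filament_profile_py tray_type profile_names → Spec_match_filament_profile_py tray_type profile_names (match_filament_profile_py tray_type profile_names)

-- ===== LEMMAS AND PROOFS =====

-- the candidate A's last two loops would produce, with its rank
def pvCand (tu pre : List Char) (names : List String) : Option (Nat × String) :=
  match names.find? (pvP1 pre) with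
  | some n => some (1, n)
  | none => (names.find? (pvP2 tu)).map (fun n => (2, n))

def pvMerge (best c : Option (Nat × String)) : Option (Nat × String) :=
  match c with
  | none => best
  | some (r, n) => pvUpd best r n

theorem pvUpd_none (r : Nat) (name : String) : pvUpd none r name = some (r, name) := rfl

theorem pvUpd_some (b : Nat × String) (r : Nat) (name : String) :
    pvUpd (some b) r name = if r < b.1 then some (r, name) else some b := rfl

theorem pvUpd_isSome (best : Option (Nat × String)) (r : Nat) (name : String) :
    ∃ y, pvUpd best r name = some y := by
  cases best with
  | none => exact ⟨(r, name), rfl⟩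
  | some b =>
    unfold pvUpd
    by_cases h : r < b.1 <;> simp [h]

theorem pvUpd_rank_le (best : Option (Nat × String)) (r : Nat) (name : String) :
    ∀ x, pvUpd best r name = some x → x.1 ≤ r := by
  intro x hx
  obtain ⟨xr, xn⟩ := x
  cases best with
  | none => rw [pvUpd_none] at hx; simp at hx; omega
  | some b =>
    obtain ⟨br, bn⟩ := b
    rw [pvUpd_some] at hx
    simp only [] at hx
    split at hx <;> simp at hx <;> omega

theorem pvMerge_upd_of_rank_le (best : Option (Nat × String)) (r : Nat) (name : String)
    (c : Option (Nat × String)) (hc : ∀ x, c = some x → r ≤ x.1) :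
    pvMerge (pvUpd best r name) c = pvUpd best r name := by
  cases c with
  | none => rfl
  | some x =>
    obtain ⟨r', m⟩ := x
    have hr' : r ≤ r' := hc (r', m) rfl
    obtain ⟨y, hb⟩ := pvUpd_isSome best r name
    have hy : y.1 ≤ r := pvUpd_rank_le best r name y hb
    show pvUpd (pvUpd best r name) r' m = pvUpd best r name
    rw [hb, pvUpd_some, if_neg (by omega)]

theorem pvUpd_upd (best : Option (Nat × String)) (r r' : Nat) (n m : String)
    (h : r' < r) : pvUpd (pvUpd best r n) r' m = pvUpd best r' m := by
  unfold pvUpd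
  cases best with
  | none => simp [h]
  | some b =>
    by_cases h1 : r < b.1
    · have h2 : r' < b.1 := by omega
      simp [h1, h, h2]
    · simp [h1]

theorem pvCand_rank (tu pre : List Char) (names : List String) :
    ∀ x, pvCand tu pre names = some x → 1 ≤ x.1 := by
  intro x hx
  obtain ⟨xr, xn⟩ := x
  unfold pvCand at hx
  cases h1 : names.find? (pvP1 pre) with
  | some n => rw [h1] at hx; simp at hx; omega
  | none =>
    rw [h1] at hx
    cases h2 : names.find? (pvP2 tu) with
    | none => rw [h2] at hx; simp at hx
    | some n => rw [h2] at hx; simp at hx; omega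

theorem pvCand_cons_p1 (tu pre : List Char) (name : String) (rest : List String)
    (h : pvP1 pre name = true) : pvCand tu pre (name :: rest) = some (1, name) := by
  unfold pvCand
  simp [h]

theorem pvAltGo_eq (tu pre : List Char) (names : List String) (best : Option (Nat × String)) :
    pvAltGo tu pre names best =
      match names.find? (fun name => pvP1 pre name && pvBase name) with
      | some n => some n
      | none => (pvMerge best (pvCand tu pre names)).map Prod.snd := by
  induction names generalizing best with
  | nil => simp [pvAltGo, pvCand, pvMerge]
  | cons name rest ih =>
    by_cases h1 : pvP1 pre name = true
    · by_cases hb : pvBase name = true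
      · simp [pvAltGo, h1, hb]
      · simp only [Bool.not_eq_true] at hb
        simp only [pvAltGo, h1, hb, if_true, if_false, Bool.and_false, List.find?_cons,
          Bool.false_eq_true]
        rw [ih]
        cases hf : rest.find? (fun n => pvP1 pre n && pvBase n) with
        | some m => simp
        | none =>
          simp only []
          rw [pvCand_cons_p1 tu pre name rest h1,
            pvMerge_upd_of_rank_le best 1 name _ (pvCand_rank tu pre rest)]
          rfl
    · simp only [Bool.not_eq_true] at h1
      have hfind : (name :: rest).find? (fun n => pvP1 pre n && pvBase n)
          = rest.find? (fun n => pvP1 pre n && pvBase n) := by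
        simp [h1]
      have hfp1 : (name :: rest).find? (pvP1 pre) = rest.find? (pvP1 pre) := by
        simp [h1]
      by_cases h2 : pvP2 tu name = true
      · simp only [pvAltGo, h1, h2, if_true, if_false, Bool.false_eq_true]
        rw [ih, hfind]
        cases hf : rest.find? (fun n => pvP1 pre n && pvBase n) with
        | some m => simp
        | none =>
          simp only []
          congr 1
          unfold pvCand
          rw [hfp1]
          cases hp1 : rest.find? (pvP1 pre) with
          | some m =>
            simp only []
            show pvUpd (pvUpd best 2 name) 1 m = pvUpd best 1 m
            exact pvUpd_upd best 2 1 name m (by omega)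
          | none =>
            have hfp2 : (name :: rest).find? (pvP2 tu) = some name := by
              simp [h2]
            rw [hfp2]
            simp only [Option.map_some]
            show pvMerge (pvUpd best 2 name) ((rest.find? (pvP2 tu)).map (fun n => (2, n)))
              = pvUpd best 2 name
            apply pvMerge_upd_of_rank_le
            intro x hx
            obtain ⟨xr, xn⟩ := x
            cases hq : rest.find? (pvP2 tu) with
            | none => rw [hq] at hx; simp at hx
            | some m => rw [hq] at hx; simp at hx; omega
      · simp only [Bool.not_eq_true] at h2
        simp only [pvAltGo, h1, h2, if_false, Bool.false_eq_true]
        rw [ih, hfind]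
        cases hf : rest.find? (fun n => pvP1 pre n && pvBase n) with
        | some m => simp
        | none =>
          simp only []
          congr 2
          unfold pvCand
          rw [hfp1]
          have hfp2 : (name :: rest).find? (pvP2 tu) = rest.find? (pvP2 tu) := by
            simp [h2]
          rw [hfp2]

-- ===== VERDICT (by name: the statement is the Claim_ definition above) =====
theorem match_filament_profile_py_spec : Claim_equal_match_filament_profile_py := by
  intro tray_type profile_names _
  unfold Spec_match_filament_profile_py
  unfold match_filament_profile_py match_filament_profile_py_alt
  simp only []
  rw [pvAltGo_eq]
  cases h0 : profile_names.find? (fun name =>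
      pvP1 ("GENERIC ".toList ++ PySem.Chars.upper tray_type.toList) name && pvBase name) with
  | some n => simp
  | none =>
    simp only []
    unfold pvCand pvMerge
    cases h1 : profile_names.find?
        (pvP1 ("GENERIC ".toList ++ PySem.Chars.upper tray_type.toList)) with
    | some n => simp [pvUpd]
    | none =>
      simp only []
      cases h2 : profile_names.find? (pvP2 (PySem.Chars.upper tray_type.toList)) with
      | none => simp
      | some m => simp [pvUpd]
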